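-- pv_equiv track=rewrite | github.com/devUuung/CuKKS | experiments/_block_diag_bench_common.py | estimate_bsgs_rotations
-- ===== SOURCE A (Python) =====
-- import math
--
-- def estimate_bsgs_rotations(in_features: int, nonzero_diags: int) -> dict[str, int]:
--     n1 = math.ceil(math.sqrt(in_features))
--     n2 = math.ceil(in_features / n1)
--     baby_step_rots = n1 - 1
--     nonempty_giant_steps = 0
--
--     for giant_step_index in range(n2):
--         giant_step = giant_step_index * n1
--         has_nonzero = False
--         for baby_step_index in range(n1):
--             diagonal_idx = giant_step + baby_step_index
--             if diagonal_idx >= in_features: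
--                 break
--             if diagonal_idx < nonzero_diags or (in_features - diagonal_idx) <= nonzero_diags:
--                 has_nonzero = True
--                 break
--         if has_nonzero:
--             nonempty_giant_steps += 1
--
--     giant_step_rots = max(0, nonempty_giant_steps - 1)
--     return {
--         "total_rotations": baby_step_rots + giant_step_rots,
--         "total_evalmults": nonzero_diags,
--         "nonzero_diagonals": nonzero_diags,
--         "dense_diagonals": in_features,
--     }
-- ===== SOURCE B (Python) =====
-- import math
--
-- def estimate_bsgs_rotations(in_features: int, nonzero_diags: int) -> dict[str, int]:
--     # O(1): the nonzero diagonals form two contiguous bands [0, head) and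
--     # [tail_start, in_features); count intersecting giant-step blocks by division.
--     n1 = 1 + math.isqrt(in_features - 1)          # ceil(sqrt(in_features))
--     n2 = -(-in_features // n1)                    # ceil(in_features / n1)
--     if nonzero_diags <= 0:
--         nonempty = 0
--     else:
--         head = min(nonzero_diags, in_features)            # band [0, head)
--         tail_start = max(0, in_features - nonzero_diags)  # band [tail_start, in_features)
--         c = -(-head // n1)        # blocks j hitting the head band: j < c
--         f = tail_start // n1      # blocks j hitting the tail band: j >= f
--         nonempty = n2 if f <= c else c + (n2 - f)
--     giant = max(0, nonempty - 1)
--     return {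
--         "total_rotations": n1 - 1 + giant,
--         "total_evalmults": nonzero_diags,
--         "nonzero_diagonals": nonzero_diags,
--         "dense_diagonals": in_features,
--     }
-- ===== Notes on version B (the rewrite author's own statement) =====
-- stated objective: faster
-- what changed: A scans every giant step and baby step to count nonempty giant steps; B notes the nonzero diagonals form two contiguous bands [0, head) and [tail_start, in_features) and counts the giant-step blocks hitting them in O(1) with ceiling/floor division and inclusion-exclusion (isqrt instead of float sqrt).
-- outside the precondition, e.g. on estimate_bsgs_rotations(0, 3): A raises ZeroDivisionError, B raises ValueError; on estimate_bsgs_rotations(-4, 3): A raises ValueError, B raises ValueError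
import Mathlib
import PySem

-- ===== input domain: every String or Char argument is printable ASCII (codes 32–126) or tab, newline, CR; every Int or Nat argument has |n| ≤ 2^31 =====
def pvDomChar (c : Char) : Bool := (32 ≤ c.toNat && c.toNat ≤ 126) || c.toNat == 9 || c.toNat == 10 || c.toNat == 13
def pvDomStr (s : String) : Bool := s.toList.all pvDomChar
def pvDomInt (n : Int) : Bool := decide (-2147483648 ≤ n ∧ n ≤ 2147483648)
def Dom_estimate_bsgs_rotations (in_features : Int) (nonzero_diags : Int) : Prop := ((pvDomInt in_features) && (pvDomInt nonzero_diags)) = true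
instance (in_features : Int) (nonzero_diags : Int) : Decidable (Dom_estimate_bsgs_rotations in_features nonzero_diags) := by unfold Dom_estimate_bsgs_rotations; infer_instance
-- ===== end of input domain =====

-- B replaces A's per-giant-step scan by an O(1) inclusion-exclusion over the two
-- contiguous nonzero-diagonal bands, using integer ceiling/floor division.

-- ===== PORT A =====
-- inner 'for baby_step_index in range(n1)' loop with its two breaks (fuel = n1)
def pvInnerA (N nz g b : Int) : Nat → Bool
  | 0 => false
  | fuel + 1 =>
    let d := g + b
    if d ≥ N then false
    else if d < nz || N - d ≤ nz then true
    else pvInnerA N nz g (b + 1) fuel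

-- outer 'for giant_step_index in range(n2)' loop accumulating nonempty_giant_steps (fuel = n2)
def pvOuterA (N nz n1 j acc : Int) : Nat → Int
  | 0 => acc
  | fuel + 1 =>
    let acc' := if pvInnerA N nz (j * n1) 0 n1.toNat then acc + 1 else acc
    pvOuterA N nz n1 (j + 1) acc' fuel

def estimate_bsgs_rotations (in_features : Int) (nonzero_diags : Int) : List (String × Int) :=
  -- math.ceil(math.sqrt(x)) and math.ceil(x / n1): the float results are exact for
  -- 1 ≤ x ≤ 2^31, ported as the integer ceilings they compute
  let r := Nat.sqrt in_features.toNat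
  let n1 : Int := if r * r = in_features.toNat then (r : Int) else (r : Int) + 1
  let n2 : Int := PySem.Int.floordiv (in_features + n1 - 1) n1
  let baby_step_rots := n1 - 1
  let nonempty_giant_steps := pvOuterA in_features nonzero_diags n1 0 0 n2.toNat
  let giant_step_rots := max 0 (nonempty_giant_steps - 1)
  [("total_rotations", baby_step_rots + giant_step_rots),
   ("total_evalmults", nonzero_diags),
   ("nonzero_diagonals", nonzero_diags),
   ("dense_diagonals", in_features)]

-- ===== PORT B =====
def estimate_bsgs_rotations_alt (in_features : Int) (nonzero_diags : Int) : List (String × Int) :=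
  let n1 : Int := 1 + (Nat.sqrt (in_features - 1).toNat : Int)  -- 1 + math.isqrt(in_features - 1)
  let n2 : Int := -(PySem.Int.floordiv (-in_features) n1)
  let nonempty : Int :=
    if nonzero_diags ≤ 0 then 0
    else
      let head := min nonzero_diags in_features
      let tail_start := max 0 (in_features - nonzero_diags)
      let c := -(PySem.Int.floordiv (-head) n1)
      let f := PySem.Int.floordiv tail_start n1
      if f ≤ c then n2 else c + (n2 - f)
  let giant := max 0 (nonempty - 1)
  [("total_rotations", n1 - 1 + giant),
   ("total_evalmults", nonzero_diags),
   ("nonzero_diagonals", nonzero_diags),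
   ("dense_diagonals", in_features)]

-- ===== PRECONDITION & SPEC =====
-- A raises on in_features ≤ 0 (math.sqrt ValueError for negatives, ZeroDivisionError at 0)
def Pre_estimate_bsgs_rotations (in_features : Int) (nonzero_diags : Int) : Prop := 1 ≤ in_features
instance (in_features : Int) (nonzero_diags : Int) : Decidable (Pre_estimate_bsgs_rotations in_features nonzero_diags) := by unfold Pre_estimate_bsgs_rotations; infer_instance
def pvWitness_estimate_bsgs_rotations : Int × Int := (10, 3)

def Spec_estimate_bsgs_rotations (in_features : Int) (nonzero_diags : Int) (out : List (String × Int)) : Prop := out = estimate_bsgs_rotations_alt in_features nonzero_diags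
instance (in_features : Int) (nonzero_diags : Int) (out : List (String × Int)) : Decidable (Spec_estimate_bsgs_rotations in_features nonzero_diags out) := by unfold Spec_estimate_bsgs_rotations; infer_instance

-- ===== CLAIM (what is proved, stated in full; the proofs are below) =====
def Claim_equal_estimate_bsgs_rotations : Prop := ∀ (in_features : Int) (nonzero_diags : Int), Dom_estimate_bsgs_rotations in_features nonzero_diags → Pre_estimate_bsgs_rotations in_features nonzero_diags → Spec_estimate_bsgs_rotations in_features nonzero_diags (estimate_bsgs_rotations in_features nonzero_diags)

-- ===== LEMMAS AND PROOFS =====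

-- ceiling square root: A's form equals B's form, at the Nat level
theorem pv_ceil_sqrt_nat (m : Nat) (hm : 1 ≤ m) :
    (if Nat.sqrt m * Nat.sqrt m = m then Nat.sqrt m else Nat.sqrt m + 1) = Nat.sqrt (m - 1) + 1 := by
  split
  · rename_i h
    have hr1 : 1 ≤ Nat.sqrt m := by
      by_contra hc
      interval_cases h' : Nat.sqrt m <;> omega
    obtain ⟨s, hs⟩ : ∃ s, Nat.sqrt m = s + 1 := ⟨Nat.sqrt m - 1, by omega⟩
    rw [hs] at h
    have h1 : s ≤ Nat.sqrt (m - 1) := by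
      apply Nat.le_sqrt.mpr
      have : s * s + 1 ≤ m := by nlinarith
      omega
    have h2 : Nat.sqrt (m - 1) < s + 1 := by
      apply Nat.sqrt_lt.mpr
      omega
    omega
  · rename_i h
    have hle : Nat.sqrt m * Nat.sqrt m ≤ m := Nat.sqrt_le m
    have h1 : Nat.sqrt m ≤ Nat.sqrt (m - 1) := Nat.le_sqrt.mpr (by omega)
    have h2 : Nat.sqrt (m - 1) ≤ Nat.sqrt m := Nat.sqrt_le_sqrt (by omega)
    omega

-- the ceiling divisions used by the two ports coincide (0 < b)
theorem pv_ceil_div_eq (a b : Int) (hb : 0 < b) :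
    PySem.Int.floordiv (a + b - 1) b = -(PySem.Int.floordiv (-a) b) := by
  have h := (PySem.Int.floordiv_eq_iff_of_pos (a := a + b - 1) (b := b) hb
      (q := PySem.Int.floordiv (a + b - 1) b)).mp rfl
  symm
  rw [PySem.Int.neg_floordiv_neg_eq_iff_of_pos hb]
  constructor <;> nlinarith [h.1, h.2]

-- what A's inner loop decides
theorem pv_innerA_spec (N nz g : Int) : ∀ (fuel : Nat) (b : Int),
    (pvInnerA N nz g b fuel = true ↔
      ∃ k : Nat, k < fuel ∧ g + b + k < N ∧ (g + b + k < nz ∨ N - (g + b + k) ≤ nz)) := by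
  intro fuel
  induction fuel with
  | zero => intro b; simp [pvInnerA]
  | succ f ih =>
    intro b
    simp only [pvInnerA]
    split
    · rename_i hge
      simp only [Bool.false_eq_true, false_iff]
      rintro ⟨k, _, hlt, _⟩
      have : (0:Int) ≤ (k:Int) := Int.natCast_nonneg k
      omega
    · rename_i hge
      split
      · rename_i hcond
        simp only [true_iff]
        refine ⟨0, by omega, by push_cast; omega, ?_⟩
        simp only [decide_eq_true_eq, Bool.or_eq_true] at hcond
        push_cast
        omega
      · rename_i hcond
        rw [ih (b + 1)]
        simp only [decide_eq_true_eq, Bool.or_eq_true, not_or, not_lt] at hcond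
        constructor
        · rintro ⟨k, hk, h1, h2⟩
          exact ⟨k + 1, by omega, by push_cast at h1 ⊢; omega, by push_cast at h2 ⊢; omega⟩
        · rintro ⟨k, hk, h1, h2⟩
          match k with
          | 0 => simp at h1 h2; omega
          | k + 1 => exact ⟨k, by omega, by push_cast at h1 ⊢; omega, by push_cast at h2 ⊢; omega⟩

-- A's outer loop counts the j in [j₀, j₀+fuel) whose block is nonempty; with the
-- blocks characterised by thresholds c (head band) and f (tail band), closed form:
theorem pv_outerA_count (N nz n1 c f : Int) : ∀ (fuel : Nat) (j acc : Int),
    (∀ j', j ≤ j' → j' < j + fuel →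
        (pvInnerA N nz (j' * n1) 0 n1.toNat = true ↔ (j' < c ∨ f ≤ j'))) →
    pvOuterA N nz n1 j acc fuel =
      acc + ((fuel : Int) - max 0 (min (j + fuel) f - max j c)) := by
  intro fuel
  induction fuel with
  | zero => intro j acc _; simp [pvOuterA]
  | succ s ih =>
    intro j acc hchar
    simp only [pvOuterA]
    rw [ih (j + 1) _ (fun j' h1 h2 => hchar j' (by omega) (by push_cast at h2 ⊢; omega))]
    have hj := hchar j (le_refl j) (by push_cast; omega)
    split
    · rename_i ht
      have := hj.mp ht
      push_cast
      omega
    · rename_i hf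
      have : ¬ (j < c ∨ f ≤ j) := fun h => hf (hj.mpr h)
      push_cast
      omega

-- a block j ∈ [0, n2) is nonempty iff it meets the head band (j < c) or the tail band (f ≤ j)
theorem pv_block_char (N nz n1 n2 c f j : Int)
    (hn1 : 0 < n1) (hN : 1 ≤ N) (hnz : 0 < nz)
    (hn2 : (n2 - 1) * n1 < N ∧ N ≤ n2 * n1)
    (hc : (c - 1) * n1 < min nz N ∧ min nz N ≤ c * n1)
    (hf : f * n1 ≤ max 0 (N - nz) ∧ max 0 (N - nz) < (f + 1) * n1)
    (hj0 : 0 ≤ j) (hjn : j < n2) :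
    (pvInnerA N nz (j * n1) 0 n1.toNat = true ↔ (j < c ∨ f ≤ j)) := by
  rw [pv_innerA_spec]
  have hgN : j * n1 < N := by
    have h1 : j * n1 ≤ (n2 - 1) * n1 := mul_le_mul_of_nonneg_right (by omega) hn1.le
    linarith [hn2.1]
  have hLN : max 0 (N - nz) < N := by
    apply max_lt <;> omega
  constructor
  · rintro ⟨k, hk, hlt, hcond⟩
    have hk0 : (0:Int) ≤ (k:Int) := Int.natCast_nonneg k
    have hkn : (k:Int) < n1 := by omega
    rcases hcond with hd | hd
    · left
      have hmin : j * n1 < min nz N := lt_min (by linarith) hgN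
      by_contra hcon
      push_neg at hcon
      have : c * n1 ≤ j * n1 := mul_le_mul_of_nonneg_right hcon hn1.le
      linarith [hc.2]
    · right
      have hj1 : j * n1 ≥ 0 := mul_nonneg hj0 hn1.le
      have hmax : max 0 (N - nz) ≤ j * n1 + (k:Int) := max_le (by linarith) (by linarith)
      by_contra hcon
      push_neg at hcon
      have : (j + 1) * n1 ≤ f * n1 := mul_le_mul_of_nonneg_right (by omega) hn1.le
      nlinarith [hf.1]
  · rintro (hjc | hfj)
    · refine ⟨0, by omega, by push_cast; linarith, Or.inl ?_⟩
      have h1 : j * n1 ≤ (c - 1) * n1 := mul_le_mul_of_nonneg_right (by omega) hn1.le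
      have h2 : min nz N ≤ nz := min_le_left _ _
      push_cast
      linarith [hc.1]
    · -- witness: the first index of the block inside the tail band
      have hLlt : max 0 (N - nz) < j * n1 + n1 := by
        have h1 : (f + 1) * n1 ≤ (j + 1) * n1 := mul_le_mul_of_nonneg_right (by omega) hn1.le
        nlinarith [hf.2]
      have hd1 : j * n1 ≤ max (j * n1) (max 0 (N - nz)) := le_max_left _ _
      have hd2 : max 0 (N - nz) ≤ max (j * n1) (max 0 (N - nz)) := le_max_right _ _
      have hdlt : max (j * n1) (max 0 (N - nz)) < j * n1 + n1 := max_lt (by linarith) hLlt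
      have hdN : max (j * n1) (max 0 (N - nz)) < N := max_lt hgN hLN
      refine ⟨(max (j * n1) (max 0 (N - nz)) - j * n1).toNat, ?_, ?_, Or.inr ?_⟩
      · have : ((max (j * n1) (max 0 (N - nz)) - j * n1).toNat : Int) = max (j * n1) (max 0 (N - nz)) - j * n1 :=
          Int.toNat_of_nonneg (by linarith)
        omega
      · rw [Int.toNat_of_nonneg (by linarith)]
        linarith
      · rw [Int.toNat_of_nonneg (by linarith)]
        have h3 : N - nz ≤ max 0 (N - nz) := le_max_right _ _
        linarith

theorem pv_main (N nz : Int) (hpre : 1 ≤ N) :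
    estimate_bsgs_rotations N nz = estimate_bsgs_rotations_alt N nz := by
  simp only [estimate_bsgs_rotations, estimate_bsgs_rotations_alt]
  have hsub : (N - 1).toNat = N.toNat - 1 := by omega
  have hcs := pv_ceil_sqrt_nat N.toNat (by omega)
  have hn1eq : (if Nat.sqrt N.toNat * Nat.sqrt N.toNat = N.toNat then ((Nat.sqrt N.toNat : Nat) : Int) else ((Nat.sqrt N.toNat : Nat) : Int) + 1)
      = 1 + (Nat.sqrt ((N - 1).toNat) : Int) := by
    rw [hsub]
    by_cases h : Nat.sqrt N.toNat * Nat.sqrt N.toNat = N.toNat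
    · rw [if_pos h]; rw [if_pos h] at hcs; omega
    · rw [if_neg h]; rw [if_neg h] at hcs; omega
  rw [hn1eq]
  set n1 : Int := 1 + (Nat.sqrt ((N - 1).toNat) : Int) with hn1def
  have hn1 : 0 < n1 := by positivity
  rw [pv_ceil_div_eq N n1 hn1]
  set n2 : Int := -(PySem.Int.floordiv (-N) n1) with hn2def
  have hn2 : (n2 - 1) * n1 < N ∧ N ≤ n2 * n1 :=
    (PySem.Int.neg_floordiv_neg_eq_iff_of_pos hn1).mp rfl
  have hn2pos : 0 < n2 := by
    by_contra hcon
    push_neg at hcon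
    have : n2 * n1 ≤ 0 := mul_nonpos_iff.mpr (Or.inr ⟨hcon, hn1.le⟩)
    linarith [hn2.2]
  have hout : pvOuterA N nz n1 0 0 n2.toNat =
      (if nz ≤ 0 then 0
       else
        if PySem.Int.floordiv (max 0 (N - nz)) n1 ≤ -(PySem.Int.floordiv (-(min nz N)) n1) then n2
        else -(PySem.Int.floordiv (-(min nz N)) n1) + (n2 - PySem.Int.floordiv (max 0 (N - nz)) n1)) := by
    by_cases hnz : nz ≤ 0
    · rw [if_pos hnz]
      rw [pv_outerA_count N nz n1 0 n2 n2.toNat 0 0 ?_]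
      · have : ((n2.toNat : Nat) : Int) = n2 := Int.toNat_of_nonneg hn2pos.le
        omega
      · intro j' h0 hlt
        rw [pv_innerA_spec]
        constructor
        · rintro ⟨k, hk, hklt, hcond⟩
          have hk0 : (0:Int) ≤ (k:Int) := Int.natCast_nonneg k
          have hjn : 0 ≤ j' * n1 := mul_nonneg h0 hn1.le
          rcases hcond with h | h <;> [left; right] <;> linarith
        · rintro (h | h)
          · omega
          · exfalso; omega
    · rw [if_neg hnz]
      push_neg at hnz
      set c : Int := -(PySem.Int.floordiv (-(min nz N)) n1) with hcdef
      set f : Int := PySem.Int.floordiv (max 0 (N - nz)) n1 with hfdef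
      have hc : (c - 1) * n1 < min nz N ∧ min nz N ≤ c * n1 :=
        (PySem.Int.neg_floordiv_neg_eq_iff_of_pos hn1).mp rfl
      have hf : f * n1 ≤ max 0 (N - nz) ∧ max 0 (N - nz) < (f + 1) * n1 :=
        (PySem.Int.floordiv_eq_iff_of_pos hn1).mp rfl
      have hcpos : 0 < c := by
        by_contra hcon
        push_neg at hcon
        have h1 : c * n1 ≤ 0 := mul_nonpos_iff.mpr (Or.inr ⟨hcon, hn1.le⟩)
        have h2 : 1 ≤ min nz N := le_min (by omega) hpre
        linarith [hc.2]
      have hf0 : 0 ≤ f := by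
        by_contra hcon
        push_neg at hcon
        have h1 : (f + 1) * n1 ≤ 0 := mul_nonpos_iff.mpr (Or.inr ⟨by omega, hn1.le⟩)
        have h2 : (0:Int) ≤ max 0 (N - nz) := le_max_left _ _
        linarith [hf.2]
      have hfn2 : f < n2 := by
        by_contra hcon
        push_neg at hcon
        have h1 : n2 * n1 ≤ f * n1 := mul_le_mul_of_nonneg_right hcon hn1.le
        have h2 : max 0 (N - nz) ≤ N - 1 := by apply max_le <;> omega
        linarith [hf.1, hn2.2]
      rw [pv_outerA_count N nz n1 c f n2.toNat 0 0 ?_]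
      · have hcast : ((n2.toNat : Nat) : Int) = n2 := Int.toNat_of_nonneg hn2pos.le
        rw [hcast]
        split <;> omega
      · intro j' h0 hlt
        have hcast : ((n2.toNat : Nat) : Int) = n2 := Int.toNat_of_nonneg hn2pos.le
        exact pv_block_char N nz n1 n2 c f j' hn1 hpre hnz hn2 hc hf h0 (by omega)
  rw [hout]

-- ===== VERDICT (by name: the statement is the Claim_ definition above) =====
theorem estimate_bsgs_rotations_spec : Claim_equal_estimate_bsgs_rotations := by
  intro N nz _ hpre
  exact pv_main N nz hpre
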